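-- pv_equiv track=rewrite | github.com/Joshjayboy/Competitive_Programming | A_Planets.py | minimum_destruction_cost
-- ===== SOURCE A (Python) =====
-- def minimum_destruction_cost(t, test_cases):
--     results = []
--
--     for case in test_cases:
--         n, c = case[0]
--         orbits = case[1]
--
--         orbit_count = {}
--         for orbit in orbits:
--             if orbit in orbit_count:
--                 orbit_count[orbit] += 1
--             else:
--                 orbit_count[orbit] = 1
--
--         total_cost = 0
--         for orbit, count in orbit_count.items():
--             total_cost += min(count, c)
--
--         results.append(total_cost)
--
--     return results
-- ===== SOURCE B (Python) =====
-- def minimum_destruction_cost(t, test_cases):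
--     results = []
--     for case in test_cases:
--         n, c = case[0]
--         orbits = case[1]
--         total_cost = 0
--         run = 0
--         prev = None
--         for x in sorted(orbits):
--             if run > 0 and prev == x:
--                 run += 1
--             else:
--                 if run > 0:
--                     total_cost += min(run, c)
--                 run = 1
--                 prev = x
--         if run > 0:
--             total_cost += min(run, c)
--         results.append(total_cost)
--     return results
-- ===== Notes on version B (the rewrite author's own statement) =====
-- stated objective: alternative
-- what changed: Replaces the hash-map frequency table with sort-then-group: each case sorts a copy of the orbit list and walks it once, adding min(run_length, c) whenever a run of equal values ends; no dict is built.
import Mathlib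
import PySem

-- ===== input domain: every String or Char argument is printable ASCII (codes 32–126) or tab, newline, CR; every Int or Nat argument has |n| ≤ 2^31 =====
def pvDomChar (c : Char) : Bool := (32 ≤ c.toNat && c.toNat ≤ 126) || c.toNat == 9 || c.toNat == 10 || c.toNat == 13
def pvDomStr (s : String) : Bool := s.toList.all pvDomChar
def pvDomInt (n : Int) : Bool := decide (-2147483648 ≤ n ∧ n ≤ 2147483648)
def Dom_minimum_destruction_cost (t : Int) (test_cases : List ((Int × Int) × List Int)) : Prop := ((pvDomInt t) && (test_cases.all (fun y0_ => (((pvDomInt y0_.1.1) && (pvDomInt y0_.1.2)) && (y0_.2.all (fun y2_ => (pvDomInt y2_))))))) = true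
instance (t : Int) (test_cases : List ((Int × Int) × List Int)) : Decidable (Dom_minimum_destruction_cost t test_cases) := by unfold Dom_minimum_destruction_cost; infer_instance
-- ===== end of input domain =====

-- B replaces A's dict frequency count with sort-then-group-consecutive-runs (no dict); same return value.

-- ===== PORT A =====
def minimum_destruction_cost (t : Int) (test_cases : List ((Int × Int) × List Int)) : List Int :=
  test_cases.foldl (fun results case_ =>
    results ++ [(((case_.2).foldl (fun d orbit =>
        if d.contains orbit then d.modify orbit 0 (· + 1) else d.insert orbit 1)
        (PySem.Dict.empty : PySem.Dict Int Int)).items).foldl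
        (fun total_cost p => total_cost + min p.2 case_.1.2) 0]) []

-- ===== PORT B =====
-- one step of B's run-walk over the sorted list; state = (total_cost, run, prev)
def pvBStep (c : Int) (st : Int × Int × Option Int) (x : Int) : Int × Int × Option Int :=
  if 0 < st.2.1 ∧ st.2.2 = some x then (st.1, st.2.1 + 1, st.2.2)
  else ((if 0 < st.2.1 then st.1 + min st.2.1 c else st.1), 1, some x)

-- B's trailing "if run > 0: total_cost += min(run, c)"
def pvBFinish (c : Int) (st : Int × Int × Option Int) : Int :=
  if 0 < st.2.1 then st.1 + min st.2.1 c else st.1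

def minimum_destruction_cost_alt (t : Int) (test_cases : List ((Int × Int) × List Int)) : List Int :=
  test_cases.foldl (fun results case_ =>
    results ++ [pvBFinish case_.1.2
      ((PySem.List.sorted case_.2 (fun x => x) false).foldl (pvBStep case_.1.2) (0, 0, none))]) []

-- ===== PRECONDITION & SPEC =====
def Spec_minimum_destruction_cost (t : Int) (test_cases : List ((Int × Int) × List Int)) (out : List Int) : Prop := out = minimum_destruction_cost_alt t test_cases
instance (t : Int) (test_cases : List ((Int × Int) × List Int)) (out : List Int) : Decidable (Spec_minimum_destruction_cost t test_cases out) := by unfold Spec_minimum_destruction_cost; infer_instance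

-- ===== CLAIM (what is proved, stated in full; the proofs are below) =====
def Claim_equal_minimum_destruction_cost : Prop := ∀ (t : Int) (test_cases : List ((Int × Int) × List Int)), Dom_minimum_destruction_cost t test_cases → Spec_minimum_destruction_cost t test_cases (minimum_destruction_cost t test_cases)

-- ===== LEMMAS AND PROOFS =====

-- the distinct values of l, in the traversal order specSum induces
def pvDistincts : List Int → List Int
  | [] => []
  | x :: l => x :: pvDistincts (l.filter (· != x))
termination_by l => l.length
decreasing_by simpa using Nat.lt_succ_of_le (List.length_filter_le _ _)

-- recursive characterisation of "sum of min(multiplicity, c) over distinct values"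
def pvSpecSum (c : Int) : List Int → Int
  | [] => 0
  | x :: l => min (1 + (l.count x : Int)) c + pvSpecSum c (l.filter (· != x))
termination_by l => l.length
decreasing_by simpa using Nat.lt_succ_of_le (List.length_filter_le _ _)

theorem pvGetD_zero_of_not_contains (d : PySem.Dict Int Int) (k : Int)
    (h : d.contains k = false) : d.getD k 0 = 0 := by
  have hc := PySem.Dict.contains_eq_isSome_get? d k
  rw [h] at hc
  cases hk : d.get? k with
  | none => simp [PySem.Dict.getD, hk]
  | some v => rw [hk] at hc; simp at hc

theorem pvAStep_eq (d : PySem.Dict Int Int) (x : Int) :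
    (if d.contains x then d.modify x 0 (· + 1) else d.insert x 1) = d.modify x 0 (· + 1) := by
  cases h : d.contains x with
  | true => simp
  | false => simp [PySem.Dict.modify, pvGetD_zero_of_not_contains d x h]

theorem pvADict_eq (orbits : List Int) :
    orbits.foldl (fun d orbit =>
        if d.contains orbit then d.modify orbit 0 (· + 1) else d.insert orbit 1)
      (PySem.Dict.empty : PySem.Dict Int Int) = PySem.Dict.counter orbits := by
  rw [PySem.Dict.counter_eq_foldl]
  congr 1
  funext d x
  exact pvAStep_eq d x

theorem pvMem_distincts_aux (n : Nat) :
    ∀ (s : List Int), s.length ≤ n → ∀ k, (k ∈ pvDistincts s ↔ k ∈ s) := by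
  induction n with
  | zero =>
    intro s hs k
    rw [List.length_eq_zero_iff.mp (Nat.le_zero.mp hs)]
    simp [pvDistincts]
  | succ n ih =>
    intro s hs k
    cases s with
    | nil => simp [pvDistincts]
    | cons x l =>
      rw [pvDistincts]
      have ihf := ih (l.filter (· != x))
        (le_trans (List.length_filter_le _ _) (Nat.le_of_succ_le_succ hs)) k
      constructor
      · intro h
        rcases List.mem_cons.mp h with rfl | h
        · exact List.mem_cons_self
        · exact List.mem_cons_of_mem _ (List.mem_filter.mp (ihf.mp h)).1
      · intro h
        rcases List.mem_cons.mp h with rfl | h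
        · exact List.mem_cons_self
        · by_cases hk : k = x
          · subst hk; exact List.mem_cons_self
          · exact List.mem_cons_of_mem _ (ihf.mpr (List.mem_filter.mpr ⟨h, by simp [hk]⟩))

theorem pvMem_distincts (s : List Int) (k : Int) : k ∈ pvDistincts s ↔ k ∈ s :=
  pvMem_distincts_aux s.length s le_rfl k

theorem pvNodup_distincts_aux (n : Nat) :
    ∀ (s : List Int), s.length ≤ n → (pvDistincts s).Nodup := by
  induction n with
  | zero =>
    intro s hs
    rw [List.length_eq_zero_iff.mp (Nat.le_zero.mp hs)]
    simp [pvDistincts]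
  | succ n ih =>
    intro s hs
    cases s with
    | nil => simp [pvDistincts]
    | cons x l =>
      rw [pvDistincts]
      refine List.nodup_cons.mpr ⟨?_, ih (l.filter (· != x))
        (le_trans (List.length_filter_le _ _) (Nat.le_of_succ_le_succ hs))⟩
      intro hx
      have := (List.mem_filter.mp ((pvMem_distincts _ _).mp hx)).2
      simp at this

theorem pvNodup_distincts (s : List Int) : (pvDistincts s).Nodup :=
  pvNodup_distincts_aux s.length s le_rfl

theorem pvSpecSum_eq_sum_aux (c : Int) (n : Nat) :
    ∀ (s : List Int), s.length ≤ n →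
      pvSpecSum c s = ((pvDistincts s).map (fun k => min ((s.count k : Int)) c)).sum := by
  induction n with
  | zero =>
    intro s hs
    rw [List.length_eq_zero_iff.mp (Nat.le_zero.mp hs)]
    simp [pvSpecSum, pvDistincts]
  | succ n ih =>
    intro s hs
    cases s with
    | nil => simp [pvSpecSum, pvDistincts]
    | cons x l =>
      rw [pvSpecSum, pvDistincts, List.map_cons, List.sum_cons,
        ih (l.filter (· != x)) (le_trans (List.length_filter_le _ _) (Nat.le_of_succ_le_succ hs))]
      congr 1
      · simp only [List.count_cons_self]; push_cast; rw [Int.add_comm 1]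
      · apply congrArg
        apply List.map_congr_left
        intro k hk
        have hkf : k ∈ l.filter (· != x) := (pvMem_distincts _ _).mp hk
        have hkx : k ≠ x := by simpa using (List.mem_filter.mp hkf).2
        simp [List.count_filter, hkx, Ne.symm hkx]

theorem pvSpecSum_eq_sum (c : Int) (s : List Int) :
    pvSpecSum c s = ((pvDistincts s).map (fun k => min ((s.count k : Int)) c)).sum :=
  pvSpecSum_eq_sum_aux c s.length s le_rfl

theorem pvStep_init (c x : Int) : pvBStep c (0, 0, none) x = (0, 1, some x) := by
  simp [pvBStep]

theorem pvBFinish_add (c : Int) (l : List Int) :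
    ∀ (t r : Int) (p : Option Int),
      pvBFinish c (l.foldl (pvBStep c) (t, r, p)) = t + pvBFinish c (l.foldl (pvBStep c) (0, r, p)) := by
  induction l with
  | nil =>
    intro t r p
    simp only [List.foldl, pvBFinish]
    split <;> ring
  | cons x l ih =>
    intro t r p
    simp only [List.foldl]
    simp only [pvBStep]
    by_cases h : 0 < r ∧ p = some x
    · simp only [if_pos h]
      rw [ih t, ih 0]
    · simp only [if_neg h]
      by_cases hr : 0 < r
      · simp only [if_pos hr]
        rw [ih (t + min r c), ih (0 + min r c)]
        ring
      · simp only [if_neg hr]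
        rw [ih t, ih 0]

theorem pvRunLemma (c : Int) (l : List Int) :
    ∀ (total run x : Int), 0 < run → (∀ y ∈ l, x ≤ y) → l.Pairwise (· ≤ ·) →
      pvBFinish c (l.foldl (pvBStep c) (total, run, some x)) =
        total + min (run + (l.count x : Int)) c +
          pvBFinish c ((l.filter (· != x)).foldl (pvBStep c) (0, 0, none)) := by
  induction l with
  | nil =>
    intro total run x hrun _ _
    simp [pvBFinish, hrun]
  | cons y l ih =>
    intro total run x hrun hle hpw
    by_cases hyx : y = x
    · subst hyx
      simp only [List.foldl, pvBStep]
      rw [if_pos (show 0 < run ∧ True from ⟨hrun, trivial⟩)]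
      have hle' : ∀ z ∈ l, y ≤ z := (List.pairwise_cons.mp hpw).1
      have hpw' : l.Pairwise (· ≤ ·) := (List.pairwise_cons.mp hpw).2
      rw [ih total (run + 1) y (by omega) hle' hpw']
      rw [List.count_cons_self]
      have hfy : (y :: l).filter (· != y) = l.filter (· != y) := by simp
      rw [hfy]
      congr 2
      push_cast
      omega
    · have hxy : x < y := lt_of_le_of_ne (hle y List.mem_cons_self) (Ne.symm hyx)
      have hly : ∀ z ∈ l, y ≤ z := (List.pairwise_cons.mp hpw).1
      have hnx : ∀ z ∈ y :: l, z ≠ x := by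
        intro z hz
        rcases List.mem_cons.mp hz with rfl | hz
        · exact hyx
        · exact fun hc => absurd (hc ▸ hly z hz) (not_le.mpr hxy)
      have hcount : (y :: l).count x = 0 := by
        rw [List.count_eq_zero]
        intro hmem
        exact hnx x hmem rfl
      have hfilt : (y :: l).filter (· != x) = y :: l := by
        apply List.filter_eq_self.mpr
        intro z hz
        simpa using hnx z hz
      simp only [List.foldl, pvBStep]
      rw [if_neg (show ¬(0 < run ∧ (some x : Option Int) = some y) from
        fun h => hyx (Option.some.inj h.2).symm)]
      rw [if_pos hrun, hcount, hfilt]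
      simp only [List.foldl, pvStep_init]
      rw [pvBFinish_add c l (total + min run c) 1 (some y)]
      push_cast
      ring_nf

theorem pvWalk_eq_specSum (c : Int) :
    ∀ (n : Nat) (l : List Int), l.length ≤ n → l.Pairwise (· ≤ ·) →
      pvBFinish c (l.foldl (pvBStep c) (0, 0, none)) = pvSpecSum c l := by
  intro n
  induction n with
  | zero =>
    intro l hl _
    rw [List.length_eq_zero_iff.mp (Nat.le_zero.mp hl)]
    simp [pvSpecSum, pvBFinish]
  | succ n ih =>
    intro l hl hpw
    cases l with
    | nil => simp [pvSpecSum, pvBFinish]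
    | cons x l =>
      simp only [List.foldl, pvStep_init]
      have hle : ∀ y ∈ l, x ≤ y := (List.pairwise_cons.mp hpw).1
      have hpw' : l.Pairwise (· ≤ ·) := (List.pairwise_cons.mp hpw).2
      rw [pvRunLemma c l 0 1 x (by omega) hle hpw']
      rw [pvSpecSum]
      rw [ih (l.filter (· != x))
        (le_trans (List.length_filter_le _ _) (Nat.le_of_succ_le_succ hl))
        (hpw'.filter _)]
      ring_nf

-- B's per-case value equals A's per-case value
theorem pvCase_eq (c : Int) (orbits : List Int) :
    (((orbits.foldl (fun d orbit =>
        if d.contains orbit then d.modify orbit 0 (· + 1) else d.insert orbit 1)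
        (PySem.Dict.empty : PySem.Dict Int Int)).items).foldl
        (fun total_cost p => total_cost + min p.2 c) 0) =
    pvBFinish c ((PySem.List.sorted orbits (fun x => x) false).foldl (pvBStep c) (0, 0, none)) := by
  rw [pvADict_eq, PySem.List.foldl_add, PySem.Dict.items_counter]
  rw [List.map_map]
  have hperm : (PySem.List.sorted orbits (fun x => x) false).Perm orbits :=
    PySem.List.sorted_perm orbits _ _
  rw [pvWalk_eq_specSum c (PySem.List.sorted orbits (fun x => x) false).length _ le_rfl
    (PySem.List.sorted_pairwise orbits _)]
  rw [pvSpecSum_eq_sum]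
  have hcnt : (fun k => min (((PySem.List.sorted orbits (fun x => x) false).count k : Int)) c)
      = (fun k => min ((orbits.count k : Int)) c) := by
    funext k
    rw [hperm.count_eq]
  rw [hcnt]
  have hp : (pvDistincts (PySem.List.sorted orbits (fun x => x) false)).Perm
      (PySem.Set.ofList orbits) := by
    apply (List.perm_ext_iff_of_nodup (pvNodup_distincts _) (PySem.Set.nodup_ofList _)).mpr
    intro a
    rw [pvMem_distincts, PySem.List.mem_sorted, PySem.Set.mem_ofList]
  rw [(hp.map _).sum_eq, zero_add]
  rfl

-- ===== VERDICT (by name: the statement is the Claim_ definition above) =====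
theorem minimum_destruction_cost_spec : Claim_equal_minimum_destruction_cost := by
  intro t test_cases _
  unfold Spec_minimum_destruction_cost minimum_destruction_cost minimum_destruction_cost_alt
  rw [PySem.List.foldl_append_singleton_eq_map, PySem.List.foldl_append_singleton_eq_map]
  apply List.map_congr_left
  intro case_ _
  exact pvCase_eq case_.1.2 case_.2
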